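-- pv_equiv track=rewrite | github.com/robbiebatley/advent-of-code | 2023/day13/main.py | score_map
-- ===== SOURCE A (Python) =====
-- def is_vert_sym(map: list[str], j: int, differences: int) -> int:
--     n = min(j, len(map[0]) - j)
--     return (
--         sum(x[j - d - 1] != x[j + d] for x in map for d in range(0, n)) == differences
--     )
--
-- def is_hor_sym(map: list[str], i: int, differences: int) -> int:
--     n = min(i, len(map) - i)
--     return (
--         sum(
--             map[i - d - 1][j] != map[i + d][j]
--             for d in range(0, n)
--             for j in range(0, len(map[0]))
--         )
--         == differences
--     )
--
-- def score_map(map: list[str], differences: int) -> int: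
--     score = 0
--     for i in range(0, len(map[0])):
--         if is_vert_sym(map, i, differences):
--             score += i
--     for j in range(0, len(map)):
--         if is_hor_sym(map, j, differences):
--             score += 100 * j
--     return score
-- ===== SOURCE B (Python) =====
-- def score_map(map: list[str], differences: int) -> int:
--     BITS = 21  # enough bits for any Unicode code point
--     width = len(map[0])
--
--     def planes(chars):
--         # bit-plane representation: one integer per bit position of the
--         # character codes, bit `pos` of planes[b] = bit b of chars[pos]
--         return [int("0" + "".join("1" if (c >> b) & 1 else "0"
--                                   for c in reversed(chars)), 2)
--                 for b in range(BITS)]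
--
--     def diff_count(pa, pb):
--         m = 0
--         for xa, xb in zip(pa, pb):
--             m |= xa ^ xb
--         return bin(m).count("1")
--
--     def axis_score(plns):
--         n = len(plns)
--         total = 0
--         for i in range(n):
--             s = sum(diff_count(plns[i - d - 1], plns[i + d])
--                     for d in range(min(i, n - i)))
--             if s == differences:
--                 total += i
--         return total
--
--     row_chars = [[ord(c) for c in r[:width]] for r in map]
--     col_chars = [[row[k] for row in row_chars] for k in range(width)]
--     return axis_score([planes(c) for c in col_chars]) \
--         + 100 * axis_score([planes(r) for r in row_chars])
-- ===== Notes on version B (the rewrite author's own statement) =====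
-- stated objective: alternative
-- what changed: Replaces per-character comparisons with a bit-plane representation: each row/column becomes 21 integers (one per bit of the character codes) and the mismatch count across a candidate mirror line is popcount of the OR of XORs of the corresponding bit-planes.
import Mathlib
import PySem

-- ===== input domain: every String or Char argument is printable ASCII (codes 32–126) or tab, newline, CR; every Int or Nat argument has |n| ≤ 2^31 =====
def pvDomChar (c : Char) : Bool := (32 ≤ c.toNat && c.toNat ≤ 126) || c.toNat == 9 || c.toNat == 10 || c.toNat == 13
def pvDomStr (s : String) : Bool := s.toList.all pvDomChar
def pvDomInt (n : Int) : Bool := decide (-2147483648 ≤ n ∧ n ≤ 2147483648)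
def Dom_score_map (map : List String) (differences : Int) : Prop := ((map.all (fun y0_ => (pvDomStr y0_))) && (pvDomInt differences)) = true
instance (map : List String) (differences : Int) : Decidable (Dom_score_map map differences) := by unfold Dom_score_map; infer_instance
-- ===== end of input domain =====

-- B swaps per-character comparison for a bit-plane representation: each line becomes
-- 21 integers (one per bit of the character codes) and the mismatch count across a
-- candidate mirror line is popcount of the OR of XORs of bit-planes (objective: alternative).

-- ===== PORT A =====
def is_vert_sym (map : List String) (j : Int) (differences : Int) : Bool :=
  let n : Int := min j (PySem.Str.len (PySem.List.pyGetD map 0 "") - j)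
  (map.foldl (fun acc x =>
    acc + (PySem.List.pyRange 0 n 1).foldl (fun acc2 d =>
      acc2 + (if PySem.Str.pyGet? x (j - d - 1) ≠ PySem.Str.pyGet? x (j + d) then (1:Int) else 0)) 0) 0)
  == differences

def is_hor_sym (map : List String) (i : Int) (differences : Int) : Bool :=
  let n : Int := min i ((map.length : Int) - i)
  ((PySem.List.pyRange 0 n 1).foldl (fun acc d =>
    acc + (PySem.List.pyRange 0 (PySem.Str.len (PySem.List.pyGetD map 0 "")) 1).foldl (fun acc2 j =>
      acc2 + (if PySem.Str.pyGet? (PySem.List.pyGetD map (i - d - 1) "") j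
                 ≠ PySem.Str.pyGet? (PySem.List.pyGetD map (i + d) "") j then (1:Int) else 0)) 0) 0)
  == differences

def score_map (map : List String) (differences : Int) : Int :=
  let score1 := (PySem.List.pyRange 0 (PySem.Str.len (PySem.List.pyGetD map 0 "")) 1).foldl
    (fun score i => if is_vert_sym map i differences then score + i else score) 0
  (PySem.List.pyRange 0 (map.length : Int) 1).foldl
    (fun score j => if is_hor_sym map j differences then score + 100 * j else score) score1

-- ===== PORT B =====
-- one bit-plane: bit `pos` of the result is bit `b` of chars[pos]; this is the
-- exact value of Python's int("0" + <bit b of each char, last char first>, 2)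
def pvPlane (cs : List Nat) (b : Nat) : Nat :=
  (cs.reverse).foldl (fun m c => 2 * m + ((c >>> b) &&& 1)) 0

def pvPlanes (cs : List Nat) : List Nat := (List.range 21).map (fun b => pvPlane cs b)

-- popcount, as Python's bin(m).count("1")
def pvPopcount (m : Nat) : Nat :=
  if m = 0 then 0 else m % 2 + pvPopcount (m / 2)
decreasing_by exact Nat.div_lt_self (Nat.pos_of_ne_zero (by assumption)) (by omega)

def pvDiffCount (pa pb : List Nat) : Nat :=
  pvPopcount ((pa.zip pb).foldl (fun m p => m ||| (p.1 ^^^ p.2)) 0)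

def pvAxisScore (plns : List (List Nat)) (differences : Int) : Int :=
  (List.range plns.length).foldl (fun total i =>
    let s : Int := (List.range (min i (plns.length - i))).foldl
      (fun acc d => acc + (pvDiffCount (plns.getD (i - d - 1) []) (plns.getD (i + d) []) : Int)) 0
    if s == differences then total + (i : Int) else total) 0

def score_map_alt (map : List String) (differences : Int) : Int :=
  let width := (map.headD "").toList.length
  let rowChars := map.map (fun r => (r.toList.take width).map Char.toNat)
  let colChars := (List.range width).map (fun k => rowChars.map (fun row => row.getD k 0))
  pvAxisScore (colChars.map pvPlanes) differences
    + 100 * pvAxisScore (rowChars.map pvPlanes) differences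

-- ===== PRECONDITION & SPEC =====
-- Pre_ excludes exactly the inputs on which A raises: the empty list (map[0] is an
-- IndexError) and maps containing a row shorter than the first row (indexed out of range).
def Pre_score_map (map : List String) (differences : Int) : Prop :=
  map ≠ [] ∧ ∀ s ∈ map, (map.headD "").toList.length ≤ s.toList.length
instance (map : List String) (differences : Int) : Decidable (Pre_score_map map differences) := by
  unfold Pre_score_map; infer_instance

def pvWitness_score_map : List String × Int := (["#.", "#."], 0)

def Spec_score_map (map : List String) (differences : Int) (out : Int) : Prop := out = score_map_alt map differences
instance (map : List String) (differences : Int) (out : Int) : Decidable (Spec_score_map map differences out) := by unfold Spec_score_map; infer_instance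

-- ===== CLAIM (what is proved, stated in full; the proofs are below) =====
def Claim_equal_score_map : Prop := ∀ (map : List String) (differences : Int), Dom_score_map map differences → Pre_score_map map differences → Spec_score_map map differences (score_map map differences)

-- ===== LEMMAS AND PROOFS =====
lemma pv_foldl_score {α : Type} (l : List α) (c : α → Bool) (g : α → Int) (init : Int) :
    l.foldl (fun s x => if c x then s + g x else s) init
      = init + (l.map (fun x => if c x then g x else 0)).sum := by
  have h : (fun (s : Int) (x : α) => if c x then s + g x else s)
      = fun s x => s + (if c x then g x else 0) := by
    funext s x; split <;> simp
  rw [h, PySem.List.foldl_add]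

lemma pv_sum_swap {α β : Type} (xs : List α) (ds : List β) (g : α → β → Int) :
    (xs.map (fun x => (ds.map (fun d => g x d)).sum)).sum
      = (ds.map (fun d => (xs.map (fun x => g x d)).sum)).sum := by
  induction xs with
  | nil => simp
  | cons x t ih => simp [ih]

lemma pv_getD_map {α β : Type} (xs : List α) (f : α → β) (n : Nat) (d : α) (db : β)
    (h : n < xs.length) : (xs.map f).getD n db = f (xs.getD n d) := by
  rw [List.getD_eq_getElem?_getD, List.getElem?_map, List.getElem?_eq_getElem h,
      List.getD_eq_getElem?_getD, List.getElem?_eq_getElem h]; rfl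

-- recursive characterization of one bit-plane
def pvBitsD (cs : List Nat) (b : Nat) : Nat :=
  match cs with
  | [] => 0
  | c :: t => ((c >>> b) &&& 1) + 2 * pvBitsD t b

lemma pv_plane_eq (cs : List Nat) (b : Nat) : pvPlane cs b = pvBitsD cs b := by
  unfold pvPlane
  rw [List.foldl_reverse]
  induction cs with
  | nil => simp [pvBitsD]
  | cons c t ih =>
    simp only [List.foldr_cons, ih, pvBitsD]
    omega

lemma pv_bitsD_testBit (cs : List Nat) (b p : Nat) :
    (pvBitsD cs b).testBit p = (cs.getD p 0).testBit b := by
  induction cs generalizing p with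
  | nil => simp [pvBitsD]
  | cons c t ih =>
    have hb : (c >>> b) &&& 1 = if c.testBit b then 1 else 0 := by
      rw [Nat.and_one_is_mod, Nat.testBit_eq_decide_div_mod_eq, Nat.shiftRight_eq_div_pow]
      split <;> simp_all
    cases p with
    | zero =>
      simp only [pvBitsD, List.getD_cons_zero]
      rw [hb]
      by_cases hc : c.testBit b <;>
        simp [hc, Nat.testBit_eq_decide_div_mod_eq, Nat.add_mul_mod_self_left]
    | succ q =>
      have hdiv : (pvBitsD (c :: t) b) / 2 = pvBitsD t b := by
        simp only [pvBitsD]; rw [hb]; split <;> omega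
      rw [Nat.testBit_add_one, hdiv, ih, List.getD_cons_succ]

lemma pv_foldl_lor_testBit {α : Type} (l : List α) (f : α → Nat) (init : Nat) (p : Nat) :
    (l.foldl (fun m x => m ||| f x) init).testBit p
      = (init.testBit p || l.any (fun x => (f x).testBit p)) := by
  induction l generalizing init with
  | nil => simp
  | cons x t ih =>
    simp only [List.foldl_cons, List.any_cons, ih, Nat.testBit_or]
    rw [Bool.or_assoc]

lemma pv_popcount_bit (b m : Nat) (hb : b ≤ 1) :
    pvPopcount (b + 2 * m) = b + pvPopcount m := by
  by_cases h : b + 2 * m = 0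
  · have hb0 : b = 0 := by omega
    have hm0 : m = 0 := by omega
    subst hb0; subst hm0
    simp [pvPopcount]
  · rw [pvPopcount, if_neg h]
    have h1 : (b + 2 * m) % 2 = b := by omega
    have h2 : (b + 2 * m) / 2 = m := by omega
    rw [h1, h2]

-- the mismatch mask built directly from the two code lists
def pvMaskD : List Nat → List Nat → Nat
  | a :: as_, b :: bs => (if a ≠ b then 1 else 0) + 2 * pvMaskD as_ bs
  | _, _ => 0

lemma pv_maskD_testBit (ca cb : List Nat) (h : ca.length = cb.length) (p : Nat) :
    (pvMaskD ca cb).testBit p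
      = decide (ca.getD p 0 ≠ cb.getD p 0 ∧ p < ca.length) := by
  induction ca generalizing cb p with
  | nil => cases cb with
    | nil => simp [pvMaskD]
    | cons _ _ => simp at h
  | cons a as_ ih =>
    cases cb with
    | nil => simp at h
    | cons b bs =>
      simp only [List.length_cons, Nat.add_right_cancel_iff] at h
      cases p with
      | zero =>
        simp only [pvMaskD, List.getD_cons_zero, List.length_cons]
        split <;> simp_all [Nat.testBit_eq_decide_div_mod_eq, Nat.add_mul_mod_self_left]
      | succ q =>
        have hdiv : (pvMaskD (a :: as_) (b :: bs)) / 2 = pvMaskD as_ bs := by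
          simp only [pvMaskD]; split <;> omega
        rw [Nat.testBit_add_one, hdiv, ih bs h q]
        simp only [List.getD_cons_succ, List.length_cons]
        by_cases h1 : as_.getD q 0 ≠ bs.getD q 0 <;> by_cases h2 : q < as_.length <;>
          simp [h1, h2, Nat.succ_lt_succ_iff]

lemma pv_ne_iff_testBit_lt (x y B : Nat) (hx : x < 2 ^ B) (hy : y < 2 ^ B) :
    x ≠ y ↔ ∃ b < B, x.testBit b ≠ y.testBit b := by
  constructor
  · intro hne
    by_contra hall
    push_neg at hall
    apply hne
    apply Nat.eq_of_testBit_eq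
    intro b
    by_cases hb : b < B
    · exact hall b hb
    · rw [Nat.testBit_lt_two_pow (lt_of_lt_of_le hx (Nat.pow_le_pow_right (by omega) (by omega))),
          Nat.testBit_lt_two_pow (lt_of_lt_of_le hy (Nat.pow_le_pow_right (by omega) (by omega)))]
  · rintro ⟨b, _, hne⟩ rfl
    exact hne rfl

-- the count of mismatching positions
def pvMismN : List Nat → List Nat → Nat
  | a :: as_, b :: bs => (if a ≠ b then 1 else 0) + pvMismN as_ bs
  | _, _ => 0

lemma pv_popcount_maskD (ca cb : List Nat) :
    pvPopcount (pvMaskD ca cb) = pvMismN ca cb := by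
  induction ca generalizing cb with
  | nil => cases cb <;> simp [pvMaskD, pvMismN, pvPopcount]
  | cons a as_ ih =>
    cases cb with
    | nil => simp [pvMaskD, pvMismN, pvPopcount]
    | cons b bs =>
      simp only [pvMaskD, pvMismN]
      rw [pv_popcount_bit _ _ (by split <;> omega), ih]

lemma pv_any_testBit_ne (x y : Nat) (hx : x < 2 ^ 21) (hy : y < 2 ^ 21) :
    ((List.range 21).any fun b => (x.testBit b ^^ y.testBit b)) = decide (x ≠ y) := by
  by_cases h : x = y
  · subst h; simp
  · obtain ⟨b, hb, hne⟩ := (pv_ne_iff_testBit_lt x y 21 hx hy).mp h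
    simp only [h, ne_eq, not_false_eq_true, decide_true, List.any_eq_true]
    exact ⟨b, List.mem_range.mpr hb, by revert hne; cases x.testBit b <;> cases y.testBit b <;> simp⟩

lemma pv_getD_lt (l : List Nat) (n : Nat) (h : ∀ x ∈ l, x < 2 ^ 21) : l.getD n 0 < 2 ^ 21 := by
  by_cases hn : n < l.length
  · rw [List.getD_eq_getElem l 0 hn]
    exact h _ (List.getElem_mem hn)
  · rw [List.getD_eq_default _ _ (by omega)]
    norm_num

lemma pv_diffCount_eq (ca cb : List Nat) (h : ca.length = cb.length)
    (hca : ∀ c ∈ ca, c < 2 ^ 21) (hcb : ∀ c ∈ cb, c < 2 ^ 21) :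
    pvDiffCount (pvPlanes ca) (pvPlanes cb) = pvMismN ca cb := by
  unfold pvDiffCount
  have hzip : (pvPlanes ca).zip (pvPlanes cb)
      = (List.range 21).map (fun b => (pvPlane ca b, pvPlane cb b)) := by
    simp [pvPlanes, List.zip_map']
  have hmask : ((pvPlanes ca).zip (pvPlanes cb)).foldl (fun m p => m ||| (p.1 ^^^ p.2)) 0
      = pvMaskD ca cb := by
    rw [hzip, List.foldl_map]
    apply Nat.eq_of_testBit_eq
    intro p
    rw [pv_foldl_lor_testBit, pv_maskD_testBit ca cb h p]
    simp only [Nat.zero_testBit, Bool.false_or, Nat.testBit_xor, pv_plane_eq, pv_bitsD_testBit]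
    rw [pv_any_testBit_ne _ _ (pv_getD_lt ca p hca) (pv_getD_lt cb p hcb)]
    by_cases hp : p < ca.length
    · simp [hp]
    · have e1 : ca.getD p 0 = 0 := List.getD_eq_default _ _ (by omega)
      have e2 : cb.getD p 0 = 0 := List.getD_eq_default _ _ (by omega)
      rw [e1, e2]
      simp [hp]
  rw [hmask, pv_popcount_maskD]

lemma pv_char_lt (c : Char) : c.toNat < 2 ^ 21 := by
  have h := c.valid
  rw [UInt32.isValidChar, Nat.isValidChar] at h
  have ht : c.toNat = c.val.toNat := rfl
  rcases h with h | ⟨h1, h2⟩ <;> rw [ht] <;> omega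

lemma pv_mismN_map {α : Type} (l : List α) (f g : α → Nat) :
    (pvMismN (l.map f) (l.map g) : Int)
      = (l.map (fun x => if f x ≠ g x then (1:Int) else 0)).sum := by
  induction l with
  | nil => simp [pvMismN]
  | cons x t ih =>
    simp only [List.map_cons, pvMismN, List.sum_cons, ← ih]
    push_cast
    split <;> simp

lemma pv_mismN_range (ca cb : List Nat) (h : ca.length = cb.length) :
    (pvMismN ca cb : Int)
      = ((List.range ca.length).map (fun k =>
          if ca.getD k 0 ≠ cb.getD k 0 then (1:Int) else 0)).sum := by
  induction ca generalizing cb with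
  | nil => simp [pvMismN]
  | cons a as_ ih =>
    cases cb with
    | nil => simp at h
    | cons b bs =>
      simp only [List.length_cons, Nat.add_right_cancel_iff] at h
      simp only [pvMismN, List.length_cons, List.range_succ_eq_map, List.map_cons,
        List.sum_cons, List.getD_cons_zero, List.map_map]
      rw [show ((fun k => if (a :: as_).getD k 0 ≠ (b :: bs).getD k 0 then (1:Int) else 0) ∘ Nat.succ)
            = fun k => if as_.getD k 0 ≠ bs.getD k 0 then (1:Int) else 0 from by
          funext k; simp [Function.comp]]
      rw [← ih bs h]
      push_cast
      split <;> simp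

lemma pv_take_map_getD (u : List Char) (W a : Nat) (hW : W ≤ u.length) (ha : a < W) :
    ((u.take W).map Char.toNat).getD a 0 = Char.toNat (u[a]'(by omega)) := by
  have hlen : a < ((u.take W).map Char.toNat).length := by simp; omega
  rw [List.getD_eq_getElem _ _ hlen]
  simp

lemma pv_toNat_inj (c d : Char) : c.toNat = d.toNat ↔ c = d := by
  constructor
  · intro h
    apply Char.ext
    exact UInt32.toNat_inj.mp h
  · intro h; rw [h]

lemma pv_ind_eq (u v : List Char) (W a b : Nat) (hu : W ≤ u.length) (hv : W ≤ v.length)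
    (ha : a < W) (hb : b < W) :
    (if ((u.take W).map Char.toNat).getD a 0 ≠ ((v.take W).map Char.toNat).getD b 0 then (1:Int) else 0)
      = if u[a]? ≠ v[b]? then (1:Int) else 0 := by
  apply if_congr _ rfl rfl
  rw [pv_take_map_getD u W a hu ha, pv_take_map_getD v W b hv hb,
      List.getElem?_eq_getElem (show a < u.length by omega),
      List.getElem?_eq_getElem (show b < v.length by omega)]
  simp [pv_toNat_inj]

lemma pv_bound_row (u : List Char) (W : Nat) :
    ∀ x ∈ (u.take W).map Char.toNat, x < 2 ^ 21 := by
  intro x hx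
  obtain ⟨c, _, rfl⟩ := List.mem_map.mp hx
  exact pv_char_lt c

lemma pv_axis_sum (plns : List (List Nat)) (differences : Int) :
    pvAxisScore plns differences
      = ((List.range plns.length).map (fun i =>
          if ((List.range (min i (plns.length - i))).foldl
                (fun acc d => acc + (pvDiffCount (plns.getD (i - d - 1) []) (plns.getD (i + d) []) : Int)) 0 == differences)
          then (i:Int) else 0)).sum := by
  have h0 : pvAxisScore plns differences
      = (List.range plns.length).foldl (fun total i =>
          if ((List.range (min i (plns.length - i))).foldl
                (fun acc d => acc + (pvDiffCount (plns.getD (i - d - 1) []) (plns.getD (i + d) []) : Int)) 0 == differences)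
          then total + (i:Int) else total) 0 := rfl
  rw [h0, pv_foldl_score (List.range plns.length) _ (fun i => (i:Int)) 0]
  simp

-- the common normal form for one candidate vertical split i
def pvNV (map : List String) (Wn i : Nat) : Int :=
  ((List.range (min i (Wn - i))).map (fun d =>
    (map.map (fun x => if x.toList[i - d - 1]? ≠ x.toList[i + d]? then (1:Int) else 0)).sum)).sum

lemma pv_vert_A (map : List String) (Wn : Nat) (i : Nat) (hi : i < Wn) :
    map.foldl (fun acc x =>
      acc + (PySem.List.pyRange 0 (min (i:Int) ((Wn:Int) - (i:Int))) 1).foldl (fun acc2 d =>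
        acc2 + (if PySem.Str.pyGet? x ((i:Int) - d - 1) ≠ PySem.Str.pyGet? x ((i:Int) + d) then (1:Int) else 0)) 0) 0
      = pvNV map Wn i := by
  have hmin : min (i:Int) ((Wn:Int) - (i:Int)) = ((min i (Wn - i) : Nat) : Int) := by omega
  rw [hmin, PySem.List.pyRange_zero, Int.toNat_natCast, PySem.List.foldl_add, zero_add,
      pvNV, ← pv_sum_swap]
  apply congrArg List.sum
  apply List.map_congr_left
  intro x _
  rw [List.foldl_map, PySem.List.foldl_add, zero_add]
  apply congrArg List.sum
  apply List.map_congr_left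
  intro d hd
  simp only [List.mem_range] at hd
  have h1 : (i:Int) - (d:Int) - 1 = ((i - d - 1 : Nat) : Int) := by omega
  have h2 : (i:Int) + (d:Int) = ((i + d : Nat) : Int) := by omega
  rw [h1, h2]
  simp only [PySem.Str.pyGet?, PySem.Chars.pyGet?_eq_listPyGet?, PySem.List.pyGet?_natCast]

lemma pv_vert_B (map : List String) (Wn : Nat)
    (hlen : ∀ s ∈ map, Wn ≤ s.toList.length) (i : Nat) (hi : i < Wn) :
    (List.range (min i (Wn - i))).foldl (fun acc d =>
      acc + (pvDiffCount
        ((((List.range Wn).map (fun k => (map.map (fun r => (r.toList.take Wn).map Char.toNat)).map (fun row => row.getD k 0))).map pvPlanes).getD (i - d - 1) [])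
        ((((List.range Wn).map (fun k => (map.map (fun r => (r.toList.take Wn).map Char.toNat)).map (fun row => row.getD k 0))).map pvPlanes).getD (i + d) []) : Int)) 0
    = pvNV map Wn i := by
  rw [PySem.List.foldl_add, zero_add, pvNV]
  apply congrArg List.sum
  apply List.map_congr_left
  intro d hd
  simp only [List.mem_range] at hd
  rw [List.map_map,
      PySem.List.getD_map_range _ _ _ _ (by omega : i - d - 1 < Wn),
      PySem.List.getD_map_range _ _ _ _ (by omega : i + d < Wn)]
  simp only [Function.comp, List.map_map]
  rw [pv_diffCount_eq _ _ (by simp)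
        (by intro c hc
            obtain ⟨x, hx, rfl⟩ := List.mem_map.mp hc
            exact pv_getD_lt _ _ (pv_bound_row _ _))
        (by intro c hc
            obtain ⟨x, hx, rfl⟩ := List.mem_map.mp hc
            exact pv_getD_lt _ _ (pv_bound_row _ _)),
      pv_mismN_map]
  apply congrArg List.sum
  apply List.map_congr_left
  intro x hx
  exact pv_ind_eq x.toList x.toList Wn (i - d - 1) (i + d)
    (hlen x hx) (hlen x hx) (by omega) (by omega)

-- the common normal form for one candidate horizontal split j
def pvNH (map : List String) (Wn j : Nat) : Int :=
  ((List.range (min j (map.length - j))).map (fun d =>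
    ((List.range Wn).map (fun k =>
      if (map.getD (j - d - 1) "").toList[k]? ≠ (map.getD (j + d) "").toList[k]? then (1:Int) else 0)).sum)).sum

lemma pv_hor_A (map : List String) (Wn : Nat)
    (hW : PySem.Str.len (PySem.List.pyGetD map 0 "") = (Wn : Int)) (j : Nat) (hj : j < map.length) :
    (PySem.List.pyRange 0 (min (j:Int) ((map.length : Int) - (j:Int))) 1).foldl (fun acc d =>
      acc + (PySem.List.pyRange 0 (PySem.Str.len (PySem.List.pyGetD map 0 "")) 1).foldl (fun acc2 k =>
        acc2 + (if PySem.Str.pyGet? (PySem.List.pyGetD map ((j:Int) - d - 1) "") k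
                   ≠ PySem.Str.pyGet? (PySem.List.pyGetD map ((j:Int) + d) "") k then (1:Int) else 0)) 0) 0
      = pvNH map Wn j := by
  have hmin : min (j:Int) ((map.length : Int) - (j:Int)) = ((min j (map.length - j) : Nat) : Int) := by
    omega
  rw [hmin, hW, PySem.List.pyRange_zero, Int.toNat_natCast, PySem.List.pyRange_zero,
      Int.toNat_natCast, List.foldl_map, PySem.List.foldl_add, zero_add, pvNH]
  apply congrArg List.sum
  apply List.map_congr_left
  intro d hd
  simp only [List.mem_range] at hd
  rw [List.foldl_map, PySem.List.foldl_add, zero_add]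
  apply congrArg List.sum
  apply List.map_congr_left
  intro k _
  have h1 : (j:Int) - (d:Int) - 1 = ((j - d - 1 : Nat) : Int) := by omega
  have h2 : (j:Int) + (d:Int) = ((j + d : Nat) : Int) := by omega
  rw [h1, h2, PySem.List.pyGetD_natCast, PySem.List.pyGetD_natCast]
  simp only [PySem.Str.pyGet?, PySem.Chars.pyGet?_eq_listPyGet?, PySem.List.pyGet?_natCast]

lemma pv_hor_B (map : List String) (Wn : Nat)
    (hlen : ∀ s ∈ map, Wn ≤ s.toList.length) (j : Nat) (hj : j < map.length) :
    (List.range (min j (map.length - j))).foldl (fun acc d =>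
      acc + (pvDiffCount
        (((map.map (fun r => (r.toList.take Wn).map Char.toNat)).map pvPlanes).getD (j - d - 1) [])
        (((map.map (fun r => (r.toList.take Wn).map Char.toNat)).map pvPlanes).getD (j + d) []) : Int)) 0
      = pvNH map Wn j := by
  rw [PySem.List.foldl_add, zero_add, pvNH]
  apply congrArg List.sum
  apply List.map_congr_left
  intro d hd
  simp only [List.mem_range] at hd
  rw [List.map_map]
  rw [pv_getD_map map _ _ "" _ (by omega : j - d - 1 < map.length),
      pv_getD_map map _ _ "" _ (by omega : j + d < map.length)]
  have m1 : map.getD (j - d - 1) "" ∈ map := by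
    rw [List.getD_eq_getElem?_getD, List.getElem?_eq_getElem (by omega : j - d - 1 < map.length)]
    exact List.getElem_mem _
  have m2 : map.getD (j + d) "" ∈ map := by
    rw [List.getD_eq_getElem?_getD, List.getElem?_eq_getElem (by omega : j + d < map.length)]
    exact List.getElem_mem _
  have l1 := hlen _ m1
  have l2 := hlen _ m2
  have hL1 : (((map.getD (j - d - 1) "").toList.take Wn).map Char.toNat).length = Wn := by
    rw [List.length_map, List.length_take]; omega
  have hL2 : (((map.getD (j + d) "").toList.take Wn).map Char.toNat).length = Wn := by
    rw [List.length_map, List.length_take]; omega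
  simp only [Function.comp]
  rw [pv_diffCount_eq _ _ (by rw [hL1, hL2]) (pv_bound_row _ _) (pv_bound_row _ _),
      pv_mismN_range _ _ (by rw [hL1, hL2]), hL1]
  apply congrArg List.sum
  apply List.map_congr_left
  intro k hk
  simp only [List.mem_range] at hk
  exact pv_ind_eq _ _ Wn k k l1 l2 hk hk

lemma pv_A_total (map : List String) (differences : Int) (Wn : Nat)
    (hW : PySem.Str.len (PySem.List.pyGetD map 0 "") = (Wn : Int)) :
    score_map map differences
      = ((List.range Wn).map (fun (i : Nat) => if is_vert_sym map (i:Int) differences then (i:Int) else 0)).sum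
        + ((List.range map.length).map (fun (j : Nat) => if is_hor_sym map (j:Int) differences then 100 * (j:Int) else 0)).sum := by
  simp only [score_map]
  rw [hW, PySem.List.pyRange_zero, Int.toNat_natCast, List.foldl_map,
      pv_foldl_score (List.range Wn) (fun k : Nat => is_vert_sym map (k:Int) differences)
        (fun k : Nat => (k:Int)) 0,
      PySem.List.pyRange_zero, Int.toNat_natCast, List.foldl_map,
      pv_foldl_score (List.range map.length) (fun k : Nat => is_hor_sym map (k:Int) differences)
        (fun k : Nat => 100 * (k:Int))]
  ring

lemma pv_ite_cond {c1 c2 : Bool} (h : c1 = c2) (a b : Int) :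
    (if c1 = true then a else b) = (if c2 = true then a else b) := by rw [h]

-- ===== VERDICT (by name: the statement is the Claim_ definition above) =====
theorem score_map_spec : Claim_equal_score_map := by
  intro map differences _ hpre
  obtain ⟨hne, hlen⟩ := hpre
  unfold Spec_score_map
  have hget0 : PySem.List.pyGetD map 0 "" = map.headD "" := by
    rw [PySem.List.pyGetD_zero]; cases map <;> rfl
  have hW : PySem.Str.len (PySem.List.pyGetD map 0 "") = (((map.headD "").toList.length : Nat) : Int) := by
    rw [hget0, PySem.Str.len_eq]
  set Wn := (map.headD "").toList.length with hWn
  have hBdef : score_map_alt map differences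
      = pvAxisScore (((List.range Wn).map (fun k => (map.map (fun r => (r.toList.take Wn).map Char.toNat)).map (fun row => row.getD k 0))).map pvPlanes) differences
        + 100 * pvAxisScore ((map.map (fun r => (r.toList.take Wn).map Char.toNat)).map pvPlanes) differences := rfl
  rw [pv_A_total map differences Wn hW, hBdef, pv_axis_sum, pv_axis_sum,
      ← List.sum_map_mul_left]
  simp only [mul_ite, mul_zero, List.length_map, List.length_range]
  congr 1
  · apply congrArg List.sum
    apply List.map_congr_left
    intro i hi
    simp only [List.mem_range] at hi
    apply pv_ite_cond
    simp only [is_vert_sym]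
    rw [hW, pv_vert_A map _ i hi, pv_vert_B map _ hlen i hi]
  · apply congrArg List.sum
    apply List.map_congr_left
    intro j hj
    simp only [List.mem_range] at hj
    apply pv_ite_cond
    simp only [is_hor_sym]
    rw [pv_hor_A map _ hW j hj, pv_hor_B map _ hlen j hj]
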